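-- pv_equiv track=rewrite | github.com/alpha-409/hash | data.py | get_transformation_groups
-- ===== SOURCE A (Python) =====
-- from typing import Dict, List, Tuple, Optional, Any
--
-- def get_transformation_groups(query_images: Dict[str, Dict[str, Any]]) -> Dict[str, List[str]]:
--     """
--     根据变换类型对查询图像进行分组
--
--     参数:
--         query_images (dict): 由load_query_images函数返回的查询图像字典
--
--     返回:
--         dict: 各种变换类型对应的查询图像ID列表
--               格式: {transformation_type: [query_image_id1, query_image_id2, ...]}
--     """
--     groups = {}
--     for image_id, image_info in query_images.items():
--         transform = image_info['transform']
--         if transform not in groups: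
--             groups[transform] = []
--         groups[transform].append(image_id)
--     return groups
-- ===== SOURCE B (Python) =====
-- def get_transformation_groups(query_images):
--     order = list(dict.fromkeys(info['transform'] for info in query_images.values()))
--     return {t: [image_id for image_id, info in query_images.items()
--                 if info['transform'] == t]
--             for t in order}
-- ===== Notes on version B (the rewrite author's own statement) =====
-- stated objective: alternative
-- what changed: A builds the groups in one pass mutating per-transform buckets in a dict; B first computes the ordered deduplicated list of transform values and then does one filtering scan of the items per transform.
import Mathlib
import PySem

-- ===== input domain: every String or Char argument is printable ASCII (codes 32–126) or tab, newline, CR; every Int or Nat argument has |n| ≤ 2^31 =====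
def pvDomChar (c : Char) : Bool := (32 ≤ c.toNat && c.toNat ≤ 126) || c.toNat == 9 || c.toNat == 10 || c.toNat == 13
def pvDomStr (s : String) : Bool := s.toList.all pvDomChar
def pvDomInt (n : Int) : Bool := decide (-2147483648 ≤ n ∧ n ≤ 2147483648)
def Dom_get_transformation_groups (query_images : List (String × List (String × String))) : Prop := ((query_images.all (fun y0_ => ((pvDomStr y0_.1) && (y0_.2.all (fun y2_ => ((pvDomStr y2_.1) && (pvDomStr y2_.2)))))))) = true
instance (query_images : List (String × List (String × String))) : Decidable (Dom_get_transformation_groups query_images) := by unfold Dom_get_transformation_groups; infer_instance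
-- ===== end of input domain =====

-- B replaces A's single-pass hash-bucket accumulation by a two-phase plan: an ordered
-- dedup of the transform values, then one filtering scan per transform (alternative, not faster).

-- ===== PORT A =====
-- info['transform']; exact under Pre_ (the key is present in every info dict)
def pvTkey (info : List (String × String)) : String :=
  (PySem.Dict.mk info).getD "transform" ""

def get_transformation_groups (query_images : List (String × List (String × String))) : List (String × List String) :=
  (query_images.foldl
    (fun (groups : PySem.Dict String (List String)) p =>
      let transform := pvTkey p.2
      let groups := if groups.contains transform then groups else groups.insert transform []
      groups.modify transform [] (fun l => l ++ [p.1]))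
    PySem.Dict.empty).items

-- ===== PORT B =====
def get_transformation_groups_alt (query_images : List (String × List (String × String))) : List (String × List String) :=
  let order := PySem.List.dedup (query_images.map (fun p => pvTkey p.2))
  order.map (fun t => (t, (query_images.filter (fun p => pvTkey p.2 == t)).map (·.1)))

-- ===== PRECONDITION & SPEC =====
-- Pre_ excludes exactly the inputs where some image_info dict lacks the key 'transform':
-- there the Python A raises KeyError (and B raises too).
def Pre_get_transformation_groups (query_images : List (String × List (String × String))) : Prop :=
  ∀ p ∈ query_images, (PySem.Dict.mk p.2).contains "transform" = true
instance (query_images : List (String × List (String × String))) : Decidable (Pre_get_transformation_groups query_images) := by unfold Pre_get_transformation_groups; infer_instance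

def pvWitness_get_transformation_groups : (List (String × List (String × String))) :=
  [("img1", [("transform", "rot90")]), ("img2", [("transform", "blur")]), ("img3", [("transform", "rot90")])]

def Spec_get_transformation_groups (query_images : List (String × List (String × String))) (out : List (String × List String)) : Prop := out = get_transformation_groups_alt query_images
instance (query_images : List (String × List (String × String))) (out : List (String × List String)) : Decidable (Spec_get_transformation_groups query_images out) := by unfold Spec_get_transformation_groups; infer_instance

-- ===== CLAIM (what is proved, stated in full; the proofs are below) =====
def Claim_equal_get_transformation_groups : Prop := ∀ (query_images : List (String × List (String × String))), Dom_get_transformation_groups query_images → Pre_get_transformation_groups query_images → Spec_get_transformation_groups query_images (get_transformation_groups query_images)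

-- ===== LEMMAS AND PROOFS =====

-- A's loop body ('if absent: groups[t] = []' then 'groups[t].append(id)') is one modify.
theorem pv_step_eq (d : PySem.Dict String (List String)) (t : String) (x : String) :
    (if d.contains t then d else d.insert t []).modify t [] (fun l => l ++ [x])
      = d.modify t [] (fun l => l ++ [x]) := by
  by_cases h : d.contains t = true
  · simp [h]
  · rw [Bool.not_eq_true] at h
    have hn : d.get? t = none := by
      have := PySem.Dict.contains_eq_isSome_get? d t
      rw [h] at this
      exact Option.not_isSome_iff_eq_none.mp (by simp [← this])
    simp [h, PySem.Dict.modify, PySem.Dict.getD, hn, PySem.Dict.insert_insert_self]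

-- A's whole loop, after pv_step_eq, is the canonical grouping fold over (key, id) pairs.
theorem pv_A_eq_bare (q : List (String × List (String × String))) :
    get_transformation_groups q
      = ((q.map (fun p => (pvTkey p.2, p.1))).foldl
          (fun (d : PySem.Dict String (List String)) pr => d.modify pr.1 [] (fun l => l ++ [pr.2]))
          PySem.Dict.empty).items := by
  unfold get_transformation_groups
  have hfun : (fun (groups : PySem.Dict String (List String)) (p : String × List (String × String)) =>
      let transform := pvTkey p.2
      let groups := if groups.contains transform then groups else groups.insert transform []
      groups.modify transform [] (fun l => l ++ [p.1]))
    = (fun (d : PySem.Dict String (List String)) (p : String × List (String × String)) =>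
        d.modify (pvTkey p.2) [] (fun l => l ++ [p.1])) :=
    funext fun d => funext fun p => pv_step_eq d (pvTkey p.2) p.1
  rw [hfun, List.foldl_map]

-- ===== VERDICT (by name: the statement is the Claim_ definition above) =====
theorem get_transformation_groups_spec : Claim_equal_get_transformation_groups := by
  intro q _ _
  unfold Spec_get_transformation_groups get_transformation_groups_alt
  rw [pv_A_eq_bare]
  set m := q.map (fun p => (pvTkey p.2, p.1)) with hm
  have hnd : ((m.foldl (fun (d : PySem.Dict String (List String)) pr => d.modify pr.1 [] (fun l => l ++ [pr.2])) PySem.Dict.empty)).keys.Nodup :=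
    PySem.Dict.nodup_keys_foldl_modify_key m (·.1) [] _ PySem.Dict.empty (by simp)
  rw [PySem.Dict.items_eq_map_keys _ hnd []]
  rw [PySem.Dict.keys_foldl_modify_key]
  simp only [PySem.Dict.getD_foldl_modify_append]
  rw [hm, List.map_map]
  simp only [PySem.List.dedup_eq_ofList, Function.comp_def]
  have hkeys : PySem.Set.update (PySem.Dict.empty (κ := String) (ν := List String)).keys (q.map (fun p => pvTkey p.2))
      = PySem.Set.ofList (q.map (fun p => pvTkey p.2)) := by
    simp [PySem.Set.update_nil_left]
  rw [hkeys]
  apply List.map_congr_left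
  intro t _
  refine Prod.ext rfl ?_
  simp only [hm]
  simp [List.filter_map, Function.comp_def]
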